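-- pv_equiv track=rewrite | github.com/mysticflounder/modular-schur | scripts/phase9_stable_tables.py | subgroup_index
-- ===== SOURCE A (Python) =====
-- import math
-- from typing import Sequence
--
-- def subgroup_index(m: int, subset: Sequence[int]) -> int:
--     if len(subset) <= 1:
--         return m
--     g = m
--     for i, a in enumerate(subset):
--         for b in subset[i + 1 :]:
--             g = math.gcd(g, abs(a - b))
--     return g
-- ===== SOURCE B (Python) =====
-- import math
--
-- def subgroup_index(m: int, subset) -> int:
--     # Faster: gcd of m with differences from a single fixed reference element (O(n) gcds).
--     if len(subset) <= 1:
--         return m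
--     r = subset[0]
--     g = m
--     for a in subset[1:]:
--         g = math.gcd(g, a - r)
--     return g
-- ===== Notes on version B (the rewrite author's own statement) =====
-- stated objective: faster
-- what changed: Replaces the nested loop over all pairs with a single pass taking gcds of differences from the fixed first element (gcd of pairwise differences equals gcd of differences from one reference).
import Mathlib
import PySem

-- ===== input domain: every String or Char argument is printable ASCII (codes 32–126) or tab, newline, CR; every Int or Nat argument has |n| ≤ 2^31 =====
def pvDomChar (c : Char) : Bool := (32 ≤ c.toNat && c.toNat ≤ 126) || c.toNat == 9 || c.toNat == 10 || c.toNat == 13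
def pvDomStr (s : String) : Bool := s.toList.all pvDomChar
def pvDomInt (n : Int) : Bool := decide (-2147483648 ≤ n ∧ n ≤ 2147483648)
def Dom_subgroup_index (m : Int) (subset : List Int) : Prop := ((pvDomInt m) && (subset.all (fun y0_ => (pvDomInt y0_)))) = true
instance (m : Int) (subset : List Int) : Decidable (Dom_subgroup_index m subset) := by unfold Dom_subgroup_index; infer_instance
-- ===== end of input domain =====

-- B computes the same value with O(n) gcds (differences from the first element) instead of A's O(n^2) pairwise loop.

-- math.gcd on ints: nonnegative gcd, as an Int
def pyGcd (a b : Int) : Int := (Int.gcd a b : Int)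

-- ===== PORT A =====
-- A's nested loop "for i,a in enumerate(subset): for b in subset[i+1:]":
-- structural recursion on tails — for each element a, fold over the elements after it, then continue with that tail.
def loopA (g : Int) : List Int → Int
  | [] => g
  | a :: rest => loopA (rest.foldl (fun g b => pyGcd g |a - b|) g) rest

def subgroup_index (m : Int) (subset : List Int) : Int :=
  if subset.length ≤ 1 then m
  else loopA m subset

-- ===== PORT B =====
def subgroup_index_alt (m : Int) (subset : List Int) : Int :=
  if subset.length ≤ 1 then m
  else
    match subset with
    | [] => m   -- unreachable (length > 1)
    | r :: rest => rest.foldl (fun g a => pyGcd g (a - r)) m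

-- ===== PRECONDITION & SPEC =====
def Spec_subgroup_index (m : Int) (subset : List Int) (out : Int) : Prop := out = subgroup_index_alt m subset
instance (m : Int) (subset : List Int) (out : Int) : Decidable (Spec_subgroup_index m subset out) := by unfold Spec_subgroup_index; infer_instance

-- ===== CLAIM (what is proved, stated in full; the proofs are below) =====
def Claim_equal_subgroup_index : Prop := ∀ (m : Int) (subset : List Int), Dom_subgroup_index m subset → Spec_subgroup_index m subset (subgroup_index m subset)

-- ===== LEMMAS AND PROOFS =====

theorem dvd_pyGcd (d a b : Int) : d ∣ pyGcd a b ↔ d ∣ a ∧ d ∣ b := by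
  unfold pyGcd
  constructor
  · intro h
    exact ⟨h.trans (Int.gcd_dvd_left a b), h.trans (Int.gcd_dvd_right a b)⟩
  · intro ⟨h1, h2⟩
    exact Int.dvd_coe_gcd h1 h2

theorem pyGcd_nonneg (a b : Int) : 0 ≤ pyGcd a b := Int.natCast_nonneg _

-- divisors of a gcd-fold: d divides the fold iff it divides the seed and every mapped element
theorem dvd_fold (d : Int) (f : Int → Int) :
    ∀ (l : List Int) (g : Int),
      (d ∣ l.foldl (fun g x => pyGcd g (f x)) g ↔ d ∣ g ∧ ∀ x ∈ l, d ∣ f x) := by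
  intro l
  induction l with
  | nil => intro g; simp
  | cons a t ih =>
    intro g
    simp only [List.foldl_cons, ih, dvd_pyGcd, List.mem_cons]
    constructor
    · rintro ⟨⟨hg, ha⟩, ht⟩
      exact ⟨hg, by rintro x (rfl | hx); exact ha; exact ht x hx⟩
    · rintro ⟨hg, h⟩
      exact ⟨⟨hg, h a (Or.inl rfl)⟩, fun x hx => h x (Or.inr hx)⟩

theorem fold_nonneg (f : Int → Int) :
    ∀ (l : List Int) (g : Int), l ≠ [] → 0 ≤ l.foldl (fun g x => pyGcd g (f x)) g := by
  intro l
  induction l with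
  | nil => intro g h; exact absurd rfl h
  | cons a t ih =>
    intro g _
    rcases t with _ | ⟨b, t'⟩
    · simpa using pyGcd_nonneg g (f a)
    · exact ih _ (by simp)

theorem dvd_loopA (d : Int) :
    ∀ (l : List Int) (g : Int),
      (d ∣ loopA g l ↔ d ∣ g ∧ ∀ a ∈ l, ∀ b ∈ l, d ∣ (a - b)) := by
  intro l
  induction l with
  | nil => intro g; simp [loopA]
  | cons a t ih =>
    intro g
    simp only [loopA, ih, dvd_fold, List.mem_cons]
    constructor
    · rintro ⟨⟨hg, habs⟩, ht⟩
      refine ⟨hg, ?_⟩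
      have hd : ∀ b ∈ t, d ∣ (a - b) := fun b hb => (dvd_abs d _).mp (habs b hb)
      rintro x (rfl | hx) y (rfl | hy)
      · simp
      · exact hd y hy
      · exact dvd_sub_comm.mp (hd x hx)
      · exact ht x hx y hy
    · rintro ⟨hg, h⟩
      refine ⟨⟨hg, fun b hb => (dvd_abs d _).mpr (h a (Or.inl rfl) b (Or.inr hb))⟩,
        fun x hx y hy => h x (Or.inr hx) y (Or.inr hy)⟩

theorem loopA_nonneg : ∀ (l : List Int) (g : Int), 0 ≤ g → 0 ≤ loopA g l := by
  intro l
  induction l with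
  | nil => intro g h; exact h
  | cons a t ih =>
    intro g hg
    rcases t with _ | ⟨b, t'⟩
    · simpa [loopA] using hg
    · exact ih _ (fold_nonneg _ _ _ (by simp))

theorem subgroup_index_spec : Claim_equal_subgroup_index := by
  intro m subset _
  unfold Spec_subgroup_index subgroup_index subgroup_index_alt
  by_cases h : subset.length ≤ 1
  · simp [h]
  · simp only [h, if_false]
    rcases subset with _ | ⟨r, rest⟩
    · simp at h
    rcases rest with _ | ⟨b, t⟩
    · simp at h
    -- both sides nonnegative
    have hA : 0 ≤ loopA m (r :: b :: t) := by
      have h0 := fold_nonneg (fun x => |r - x|) (b :: t) m (by simp)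
      have : loopA m (r :: b :: t) = loopA ((b :: t).foldl (fun g x => pyGcd g |r - x|) m) (b :: t) := rfl
      rw [this]
      exact loopA_nonneg _ _ h0
    have hB : 0 ≤ (b :: t).foldl (fun g a => pyGcd g (a - r)) m :=
      fold_nonneg (fun a => a - r) _ _ (by simp)
    -- mutual divisibility via the divisor characterizations
    apply Int.dvd_antisymm hA hB
    · rw [dvd_fold]
      have h := (dvd_loopA (loopA m (r :: b :: t)) (r :: b :: t) m).mp dvd_rfl
      exact ⟨h.1, fun x hx => h.2 x (List.mem_cons_of_mem _ hx) r (List.mem_cons_self)⟩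
    · rw [dvd_loopA]
      have h := (dvd_fold ((b :: t).foldl (fun g a => pyGcd g (a - r)) m) (fun a => a - r) (b :: t) m).mp dvd_rfl
      refine ⟨h.1, ?_⟩
      have key : ∀ x ∈ r :: b :: t, ((b :: t).foldl (fun g a => pyGcd g (a - r)) m) ∣ (x - r) := by
        intro x hx0
        rcases List.mem_cons.mp hx0 with rfl | hx
        · simp
        · exact h.2 x hx
      intro x hx y hy
      have : x - y = (x - r) - (y - r) := by ring
      rw [this]
      exact (key x hx).sub (key y hy)
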